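-- pv_equiv track=rewrite | github.com/hukaidong/leeTogetherCode | weekly284/angelika-2.py | digArtifacts
-- ===== SOURCE A (Python) =====
-- from typing import List
--
-- def digArtifacts(n: int, artifacts: List[List[int]], dig: List[List[int]]) -> int:
--     idx = 0
--     cav = dict()
--     cnt = dict()
--     for r1, c1, r2, c2 in artifacts:
--         cnt[idx] = (r2 - r1 + 1) * (c2 - c1 + 1)
--         for r in range(r1, r2 + 1):
--             for c in range(c1, c2 + 1):
--                 cav[(r, c)] = idx
--         idx += 1
--
--     ans = 0
--     for x, y in dig:
--         if (x, y) in cav: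
--             no_a = cav[(x, y)]
--             cnt[no_a] -= 1
--             if cnt[no_a] == 0:
--                 ans += 1
--
--     return ans
-- ===== SOURCE B (Python) =====
-- from typing import List
--
--
-- def digArtifacts(n: int, artifacts: List[List[int]], dig: List[List[int]]) -> int:
--     # count, per artifact, how many digs fall inside its rectangle
--     hits = {}
--     for x, y in dig:
--         for i, (r1, c1, r2, c2) in enumerate(artifacts):
--             if r1 <= x <= r2 and c1 <= y <= c2:
--                 hits[i] = hits.get(i, 0) + 1
--                 break
--     ans = 0
--     for i in range(len(artifacts)):
--         r1, c1, r2, c2 = artifacts[i]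
--         if hits.get(i, 0) >= (r2 - r1 + 1) * (c2 - c1 + 1):
--             ans += 1
--     return ans
-- ===== Notes on version B (the rewrite author's own statement) =====
-- stated objective: alternative
-- what changed: B drops A's cell-to-artifact dict and mutable decrement-to-zero counters: it scans the artifacts per dig for the rectangle containing that cell, tallies dig hits per artifact, and finally compares each artifact's hits against its rectangle area; Pre_ restricts to the problem's natural domain (4-value rows whose computed area is positive, pair digs, pairwise disjoint rectangles) because A raises on malformed rows and its values on overlapping rectangles or rows with nonpositive area are accidents of dict overwrite and an unreachable zero check.
-- outside the precondition, e.g. on digArtifacts(3, [[0, 0, 0, 1], [0, 1, 0, 2]], [[0, 1], [0, 2]]): A returns 1, B returns 0; on digArtifacts(0, [[0, 0, -1, 0]], []): A returns 0, B returns 1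
import Mathlib
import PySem

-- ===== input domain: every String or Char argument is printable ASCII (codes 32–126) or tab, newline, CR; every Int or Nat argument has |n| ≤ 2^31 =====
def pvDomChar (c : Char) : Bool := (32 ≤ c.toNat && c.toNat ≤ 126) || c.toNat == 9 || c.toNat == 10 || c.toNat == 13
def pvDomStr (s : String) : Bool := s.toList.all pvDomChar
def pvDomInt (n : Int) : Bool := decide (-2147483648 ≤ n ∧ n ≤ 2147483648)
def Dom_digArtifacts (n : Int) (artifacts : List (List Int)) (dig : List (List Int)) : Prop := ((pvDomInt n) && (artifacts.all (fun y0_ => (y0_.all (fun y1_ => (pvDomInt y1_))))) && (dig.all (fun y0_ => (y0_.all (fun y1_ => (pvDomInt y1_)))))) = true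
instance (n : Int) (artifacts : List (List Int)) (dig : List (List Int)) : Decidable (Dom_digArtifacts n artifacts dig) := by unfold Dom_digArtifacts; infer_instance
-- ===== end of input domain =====

-- B replaces A's cell→artifact dict + decrement-to-zero counters by a per-dig scan for the
-- containing artifact plus a hits-vs-area comparison per artifact (alternative decomposition,
-- not claimed faster).

-- ===== PORT A =====
-- body of A's first loop: register the artifact's area under idx and map every cell to idx
def buildStep (s : Int × PySem.Dict (Int × Int) Int × PySem.Dict Int Int) (art : List Int) :
    Int × PySem.Dict (Int × Int) Int × PySem.Dict Int Int :=
  match art with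
  | [r1, c1, r2, c2] =>
    let cnt := s.2.2.insert s.1 ((r2 - r1 + 1) * (c2 - c1 + 1))
    let cav := (PySem.List.pyRange r1 (r2 + 1) 1).foldl
      (fun cav r => (PySem.List.pyRange c1 (c2 + 1) 1).foldl
        (fun cav c => cav.insert (r, c) s.1) cav) s.2.1
    (s.1 + 1, cav, cnt)
  | _ => s   -- Python raises ValueError on a row that is not 4 values; excluded by Pre_

-- body of A's second loop over dig
def digStep (cav : PySem.Dict (Int × Int) Int) (t : Int × PySem.Dict Int Int) (d : List Int) :
    Int × PySem.Dict Int Int :=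
  match d with
  | [x, y] =>
    match cav.get? (x, y) with
    | some no_a =>
      -- cnt[no_a] -= 1 : the key is always present (cav's values are cnt's keys)
      let cnt := t.2.insert no_a (t.2.getD no_a 0 - 1)
      (if cnt.getD no_a 0 == 0 then t.1 + 1 else t.1, cnt)
    | none => t
  | _ => t   -- Python raises ValueError on a dig that is not a pair; excluded by Pre_

def digArtifacts (n : Int) (artifacts : List (List Int)) (dig : List (List Int)) : Int :=
  let s := artifacts.foldl buildStep (0, PySem.Dict.empty, PySem.Dict.empty)
  (dig.foldl (digStep s.2.1) (0, s.2.2)).1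

-- ===== PORT B =====
-- B's containment test  r1 <= x <= r2 and c1 <= y <= c2  (false on a malformed row, excluded by Pre_)
def containsB (a : List Int) (x y : Int) : Bool :=
  match a with
  | [r1, c1, r2, c2] => decide (r1 ≤ x ∧ x ≤ r2 ∧ c1 ≤ y ∧ y ≤ c2)
  | _ => false

-- B's inner enumerate-and-break loop: index of the first artifact containing (x, y)
def scanFwd : List (List Int) → Int → Int → Int → Option Int
  | [], _, _, _ => none
  | a :: rest, i, x, y => if containsB a x y then some i else scanFwd rest (i + 1) x y

-- body of B's first loop: credit the dig to the artifact containing it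
def hitStep (artifacts : List (List Int)) (h : PySem.Dict Int Int) (d : List Int) :
    PySem.Dict Int Int :=
  match d with
  | [x, y] =>
    match scanFwd artifacts 0 x y with
    | some i => h.insert i (h.getD i 0 + 1)
    | none => h
  | _ => h   -- Python raises ValueError on a dig that is not a pair; excluded by Pre_

-- body of B's second loop: an artifact is extracted when its hits cover its whole area
def ansStep (artifacts : List (List Int)) (hits : PySem.Dict Int Int) (ans : Int) (i : Int) : Int :=
  match PySem.List.pyGet? artifacts i with
  | some [r1, c1, r2, c2] =>
    if hits.getD i 0 ≥ (r2 - r1 + 1) * (c2 - c1 + 1) then ans + 1 else ans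
  | _ => ans   -- unpacking raises outside Pre_; unreachable inside range(len(artifacts)) under Pre_

def digArtifacts_alt (n : Int) (artifacts : List (List Int)) (dig : List (List Int)) : Int :=
  let hits := dig.foldl (hitStep artifacts) PySem.Dict.empty
  (PySem.List.pyRange 0 (artifacts.length : Int) 1).foldl (ansStep artifacts hits) 0

-- ===== PRECONDITION & SPEC =====
def wellFormedRect (a : List Int) : Bool :=
  match a with
  | [r1, c1, r2, c2] => decide (1 ≤ (r2 - r1 + 1) * (c2 - c1 + 1))
  | _ => false

def rectDisjoint (a b : List Int) : Bool :=
  match a, b with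
  | [r1, c1, r2, c2], [s1, d1, s2, d2] => decide (r2 < s1 ∨ s2 < r1 ∨ c2 < d1 ∨ d2 < c1)
  | _, _ => true

-- Pre_ restricts to the problem's natural domain: artifact rows are 4 values with positive area
-- (r2-r1+1)*(c2-c1+1) (A raises on other row shapes; on rows with nonpositive area A's zero check
-- is unreachable, an accident of its implementation), digs are pairs (else A raises), and the
-- rectangles are pairwise disjoint (on overlapping artifacts A credits a shared cell only to the
-- last-listed artifact, an accident of dict overwrite).
def Pre_digArtifacts (n : Int) (artifacts : List (List Int)) (dig : List (List Int)) : Prop :=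
  (∀ a ∈ artifacts, wellFormedRect a = true) ∧ (∀ d ∈ dig, d.length = 2) ∧
  artifacts.Pairwise (fun a b => rectDisjoint a b = true)
instance (n : Int) (artifacts : List (List Int)) (dig : List (List Int)) : Decidable (Pre_digArtifacts n artifacts dig) := by unfold Pre_digArtifacts; infer_instance

def pvWitness_digArtifacts : Int × List (List Int) × List (List Int) :=
  (3, [[0, 0, 1, 1], [3, 0, 3, 2]], [[0, 0], [1, 1], [5, 5]])

def Spec_digArtifacts (n : Int) (artifacts : List (List Int)) (dig : List (List Int)) (out : Int) : Prop := out = digArtifacts_alt n artifacts dig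
instance (n : Int) (artifacts : List (List Int)) (dig : List (List Int)) (out : Int) : Decidable (Spec_digArtifacts n artifacts dig out) := by unfold Spec_digArtifacts; infer_instance

-- ===== CLAIM (what is proved, stated in full; the proofs are below) =====
def Claim_equal_digArtifacts : Prop := ∀ (n : Int) (artifacts : List (List Int)) (dig : List (List Int)), Dom_digArtifacts n artifacts dig → Pre_digArtifacts n artifacts dig → Spec_digArtifacts n artifacts dig (digArtifacts n artifacts dig)

-- ===== LEMMAS AND PROOFS =====

-- proof-side: index of the LAST artifact containing (x, y), scanning the reversed list
-- (this is what A's cell dict stores; it equals scanFwd under pairwise disjointness)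
def ownerAux : List (List Int) → Int → Int → Int → Option Int
  | [], _, _, _ => none
  | a :: rest, i, x, y =>
    match a with
    | [r1, c1, r2, c2] =>
      if r1 ≤ x ∧ x ≤ r2 ∧ c1 ≤ y ∧ y ≤ c2 then some i else ownerAux rest (i - 1) x y
    | _ => ownerAux rest (i - 1) x y

-- helper: the area of a 4-element row (0 on any other shape, unreachable under Pre_)
def areaOf (a : List Int) : Int :=
  match a with
  | [r1, c1, r2, c2] => (r2 - r1 + 1) * (c2 - c1 + 1)
  | _ => 0

-- area of artifact i (Int index, looked up safely)
def areaAt (artifacts : List (List Int)) (i : Int) : Int :=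
  areaOf ((artifacts[i.toNat]?).getD [])

-- last owner of a dig row (none for a malformed row, unreachable under Pre_)
def ownFull (artifacts : List (List Int)) (d : List Int) : Option Int :=
  match d with
  | [x, y] => ownerAux artifacts.reverse ((artifacts.length : Int) - 1) x y
  | _ => none

-- first owner of a dig row, as B computes it
def ownF (artifacts : List (List Int)) (d : List Int) : Option Int :=
  match d with
  | [x, y] => scanFwd artifacts 0 x y
  | _ => none

theorem len4_shape (a : List Int) (h : a.length = 4) : ∃ r1 c1 r2 c2, a = [r1, c1, r2, c2] := by
  rcases a with _ | ⟨r1, _ | ⟨c1, _ | ⟨r2, _ | ⟨c2, _ | t⟩⟩⟩⟩ <;> simp_all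

theorem len2_shape (d : List Int) (h : d.length = 2) : ∃ x y, d = [x, y] := by
  rcases d with _ | ⟨x, _ | ⟨y, _ | t⟩⟩ <;> simp_all

theorem wf_shape (a : List Int) (h : wellFormedRect a = true) :
    ∃ r1 c1 r2 c2, a = [r1, c1, r2, c2] ∧ 1 ≤ (r2 - r1 + 1) * (c2 - c1 + 1) := by
  rcases a with _ | ⟨r1, _ | ⟨c1, _ | ⟨r2, _ | ⟨c2, _ | t⟩⟩⟩⟩ <;> simp_all [wellFormedRect]

theorem wf_len4 (a : List Int) (h : wellFormedRect a = true) : a.length = 4 := by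
  obtain ⟨r1, c1, r2, c2, rfl, _⟩ := wf_shape a h; rfl

-- two disjoint rectangles never both contain a cell
theorem disjoint_not_both (a b : List Int) (x y : Int) (hd : rectDisjoint a b = true) :
    ¬(containsB a x y = true ∧ containsB b x y = true) := by
  rcases a with _ | ⟨r1, _ | ⟨c1, _ | ⟨r2, _ | ⟨c2, _ | t⟩⟩⟩⟩ <;>
    rcases b with _ | ⟨s1, _ | ⟨d1, _ | ⟨s2, _ | ⟨d2, _ | u⟩⟩⟩⟩ <;>
    simp_all [containsB, rectDisjoint] <;> omega

theorem scanFwd_append (l : List (List Int)) (a : List Int) (i x y : Int) :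
    scanFwd (l ++ [a]) i x y
      = match scanFwd l i x y with
        | some j => some j
        | none => scanFwd [a] (i + (l.length : Int)) x y := by
  induction l generalizing i with
  | nil => simp [scanFwd]
  | cons b rest ih =>
    simp only [List.cons_append, scanFwd]
    by_cases hb : containsB b x y = true
    · simp [hb]
    · simp only [hb, if_false, Bool.false_eq_true, ih]
      have hlen : i + 1 + (rest.length : Int) = i + ((rest.length : Int) + 1) := by ring
      rw [hlen]
      cases h : scanFwd rest (i + 1) x y <;> simp [h, scanFwd]

theorem scanFwd_some (l : List (List Int)) (i x y j : Int)
    (h : scanFwd l i x y = some j) : ∃ b ∈ l, containsB b x y = true := by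
  induction l generalizing i with
  | nil => simp [scanFwd] at h
  | cons b rest ih =>
    simp only [scanFwd] at h
    by_cases hb : containsB b x y = true
    · exact ⟨b, List.mem_cons_self, hb⟩
    · rw [if_neg (by simp [hb])] at h
      obtain ⟨c, hc, hcc⟩ := ih (i + 1) h
      exact ⟨c, List.mem_cons_of_mem _ hc, hcc⟩

-- under pairwise disjointness the last owner IS the first owner
theorem last_eq_fwd (l : List (List Int)) (Hwf : ∀ a ∈ l, wellFormedRect a = true)
    (Hd : l.Pairwise (fun a b => rectDisjoint a b = true)) (x y : Int) :
    ownerAux l.reverse ((l.length : Int) - 1) x y = scanFwd l 0 x y := by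
  induction l using List.reverseRecOn with
  | nil => simp [ownerAux, scanFwd]
  | append_singleton l a ih =>
    have Hwfl : ∀ b ∈ l, wellFormedRect b = true := fun b hb => Hwf b (List.mem_append_left _ hb)
    have hpair := List.pairwise_append.1 Hd
    obtain ⟨r1, c1, r2, c2, rfl, _⟩ :=
      wf_shape a (Hwf a (List.mem_append_right _ (List.mem_singleton_self _)))
    have hrev : (l ++ [[r1, c1, r2, c2]]).reverse = [r1, c1, r2, c2] :: l.reverse := by simp
    have hlen : ((l ++ [[r1, c1, r2, c2]]).length : Int) - 1 = (l.length : Int) := by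
      push_cast [List.length_append, List.length_cons, List.length_nil]; omega
    rw [hrev, hlen, scanFwd_append]
    simp only [ownerAux]
    by_cases hc : r1 ≤ x ∧ x ≤ r2 ∧ c1 ≤ y ∧ y ≤ c2
    · rw [if_pos hc]
      have hnone : scanFwd l 0 x y = none := by
        cases h : scanFwd l 0 x y with
        | none => rfl
        | some j =>
          obtain ⟨b, hb, hbc⟩ := scanFwd_some l 0 x y j h
          have hdisj : rectDisjoint b [r1, c1, r2, c2] = true :=
            hpair.2.2 b hb _ (List.mem_singleton_self _)
          exact absurd ⟨hbc, by simp [containsB, hc]⟩ (disjoint_not_both b _ x y hdisj)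
      rw [hnone]
      simp [scanFwd, containsB, hc]
    · rw [if_neg hc, ih Hwfl hpair.1]
      cases h : scanFwd l 0 x y with
      | some j => rfl
      | none => simp [scanFwd, containsB, hc]

-- the two owner notions agree on every dig row under Pre_
theorem own_eq (artifacts : List (List Int)) (Hwf : ∀ a ∈ artifacts, wellFormedRect a = true)
    (Hd : artifacts.Pairwise (fun a b => rectDisjoint a b = true)) (d : List Int) :
    ownFull artifacts d = ownF artifacts d := by
  rcases d with _ | ⟨x, _ | ⟨y, _ | t⟩⟩ <;> simp [ownFull, ownF]
  exact last_eq_fwd artifacts Hwf Hd x y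

theorem inner_get (cols : List Int) (r v x y : Int) :
    ∀ base : PySem.Dict (Int × Int) Int,
      ((cols.foldl (fun d c => d.insert (r, c) v) base).get? (x, y))
        = if x = r ∧ y ∈ cols then some v else base.get? (x, y) := by
  induction cols with
  | nil => intro base; simp
  | cons c cs ih =>
    intro base
    rw [List.foldl_cons, ih, PySem.Dict.get?_insert]
    split_ifs <;> simp_all [List.mem_cons, Prod.ext_iff]

theorem outer_get (rows cols : List Int) (v x y : Int) :
    ∀ base : PySem.Dict (Int × Int) Int,
      ((rows.foldl (fun cav r => cols.foldl (fun cav c => cav.insert (r, c) v) cav) base).get? (x, y))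
        = if x ∈ rows ∧ y ∈ cols then some v else base.get? (x, y) := by
  induction rows with
  | nil => intro base; simp
  | cons r rs ih =>
    intro base
    rw [List.foldl_cons, ih, inner_get]
    split_ifs <;> simp_all [List.mem_cons]

theorem rect_get (r1 c1 r2 c2 v x y : Int) (base : PySem.Dict (Int × Int) Int) :
    (((PySem.List.pyRange r1 (r2 + 1) 1).foldl
        (fun cav r => (PySem.List.pyRange c1 (c2 + 1) 1).foldl
          (fun cav c => cav.insert (r, c) v) cav) base).get? (x, y))
      = if r1 ≤ x ∧ x ≤ r2 ∧ c1 ≤ y ∧ y ≤ c2 then some v else base.get? (x, y) := by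
  rw [outer_get]
  have hiff : (x ∈ PySem.List.pyRange r1 (r2 + 1) 1 ∧ y ∈ PySem.List.pyRange c1 (c2 + 1) 1)
      ↔ (r1 ≤ x ∧ x ≤ r2 ∧ c1 ≤ y ∧ y ≤ c2) := by
    simp only [PySem.List.mem_pyRange_one]
    omega
  rw [if_congr hiff rfl rfl]

-- characterisation of A's build fold: final idx, cell→owner map, per-index area table
theorem build_spec (l : List (List Int)) (H4 : ∀ a ∈ l, a.length = 4) :
    (l.foldl buildStep (0, PySem.Dict.empty, PySem.Dict.empty)).1 = (l.length : Int)
    ∧ (∀ x y : Int, (l.foldl buildStep (0, PySem.Dict.empty, PySem.Dict.empty)).2.1.get? (x, y)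
          = ownerAux l.reverse ((l.length : Int) - 1) x y)
    ∧ (∀ jn : Nat, jn < l.length →
          (l.foldl buildStep (0, PySem.Dict.empty, PySem.Dict.empty)).2.2.getD (jn : Int) 0
            = areaAt l (jn : Int)) := by
  induction l using List.reverseRecOn with
  | nil => refine ⟨rfl, fun x y => by simp [ownerAux], fun jn h => by simp at h⟩
  | append_singleton l a ih =>
    have H4l : ∀ b ∈ l, b.length = 4 := fun b hb => H4 b (List.mem_append_left _ hb)
    obtain ⟨hidx, hcav, hcnt⟩ := ih H4l
    obtain ⟨r1, c1, r2, c2, rfl⟩ := len4_shape a (H4 a (List.mem_append_right _ (List.mem_singleton_self _)))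
    rw [List.foldl_append]
    simp only [List.foldl_cons, List.foldl_nil]
    rw [show buildStep (l.foldl buildStep (0, PySem.Dict.empty, PySem.Dict.empty)) [r1, c1, r2, c2]
        = ((l.foldl buildStep (0, PySem.Dict.empty, PySem.Dict.empty)).1 + 1,
           (PySem.List.pyRange r1 (r2 + 1) 1).foldl
             (fun cav r => (PySem.List.pyRange c1 (c2 + 1) 1).foldl
               (fun cav c => cav.insert (r, c) (l.foldl buildStep (0, PySem.Dict.empty, PySem.Dict.empty)).1) cav)
             (l.foldl buildStep (0, PySem.Dict.empty, PySem.Dict.empty)).2.1,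
           (l.foldl buildStep (0, PySem.Dict.empty, PySem.Dict.empty)).2.2.insert
             (l.foldl buildStep (0, PySem.Dict.empty, PySem.Dict.empty)).1 ((r2 - r1 + 1) * (c2 - c1 + 1)))
      from rfl]
    refine ⟨by rw [hidx]; push_cast [List.length_append, List.length_cons, List.length_nil]; omega, ?_, ?_⟩
    · intro x y
      rw [hidx, rect_get]
      have hrev : (l ++ [[r1, c1, r2, c2]]).reverse = [r1, c1, r2, c2] :: l.reverse := by simp
      rw [hrev]
      have hlen : ((l ++ [[r1, c1, r2, c2]]).length : Int) - 1 = (l.length : Int) := by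
        push_cast [List.length_append, List.length_cons, List.length_nil]; omega
      rw [hlen]
      simp only [ownerAux]
      by_cases hc : r1 ≤ x ∧ x ≤ r2 ∧ c1 ≤ y ∧ y ≤ c2
      · simp [hc]
      · rw [if_neg hc, if_neg hc, hcav]
    · intro jn hjn
      rw [hidx, PySem.Dict.getD_insert]
      by_cases hj : jn = l.length
      · have hj' : ((jn : Nat) : Int) = (l.length : Int) := by exact_mod_cast hj
        rw [if_pos hj']
        unfold areaAt
        simp only [Int.toNat_natCast, hj, List.getElem?_concat_length, Option.getD_some]
        simp [areaOf]
      · have hlt : jn < l.length := by simp at hjn; omega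
        have hne : (jn : Int) ≠ (l.length : Int) := by exact_mod_cast hj
        rw [if_neg hne, hcnt jn hlt]
        unfold areaAt
        simp only [Int.toNat_natCast]
        rw [List.getElem?_append_left hlt]

-- a defined last owner is a valid index of an artifact that really contains the cell (area ≥ 1)
theorem owner_some (l : List (List Int)) (H4 : ∀ a ∈ l, a.length = 4) (x y j : Int)
    (h : ownerAux l.reverse ((l.length : Int) - 1) x y = some j) :
    ∃ jn : Nat, j = (jn : Int) ∧ jn < l.length ∧ 1 ≤ areaAt l (jn : Int) := by
  induction l using List.reverseRecOn with
  | nil => simp [ownerAux] at h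
  | append_singleton l a ih =>
    have H4l : ∀ b ∈ l, b.length = 4 := fun b hb => H4 b (List.mem_append_left _ hb)
    obtain ⟨r1, c1, r2, c2, rfl⟩ := len4_shape a (H4 a (List.mem_append_right _ (List.mem_singleton_self _)))
    have hrev : (l ++ [[r1, c1, r2, c2]]).reverse = [r1, c1, r2, c2] :: l.reverse := by simp
    rw [hrev] at h
    have hlen : ((l ++ [[r1, c1, r2, c2]]).length : Int) - 1 = (l.length : Int) := by
      push_cast [List.length_append, List.length_cons, List.length_nil]; omega
    rw [hlen] at h
    simp only [ownerAux] at h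
    by_cases hc : r1 ≤ x ∧ x ≤ r2 ∧ c1 ≤ y ∧ y ≤ c2
    · rw [if_pos hc] at h
      refine ⟨l.length, (Option.some.inj h).symm, by simp, ?_⟩
      unfold areaAt
      simp [areaOf]
      nlinarith [hc.1, hc.2.1, hc.2.2.1, hc.2.2.2]
    · rw [if_neg hc] at h
      obtain ⟨jn, hj, hlt, harea⟩ := ih H4l h
      refine ⟨jn, hj, by simp; omega, ?_⟩
      unfold areaAt at harea ⊢
      simp only [Int.toNat_natCast] at harea ⊢
      rw [List.getElem?_append_left hlt]
      exact harea

-- B's hit-counting fold computes, per key, the number of digs first-owned by that artifact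
theorem hits_getD (artifacts : List (List Int)) (l : List (List Int)) :
    ∀ (base : PySem.Dict Int Int) (j : Int),
      (l.foldl (hitStep artifacts) base).getD j 0
        = base.getD j 0 + (l.countP (fun d => ownF artifacts d == some j) : Int) := by
  induction l with
  | nil => intro base j; simp
  | cons d rest ih =>
    intro base j
    rw [List.foldl_cons, List.countP_cons]
    rcases d with _ | ⟨x, _ | ⟨y, _ | t⟩⟩
    · rw [ih]; simp [hitStep, ownF]
    · rw [ih]; simp [hitStep, ownF]
    · cases howner : scanFwd artifacts 0 x y with
      | none =>
        have hs : hitStep artifacts base [x, y] = base := by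
          simp only [hitStep, howner]
        have hp : (ownF artifacts [x, y] == some j) = false := by
          simp [ownF, howner]
        rw [hs, ih, hp]; simp
      | some i =>
        have hs : hitStep artifacts base [x, y] = base.insert i (base.getD i 0 + 1) := by
          simp only [hitStep, howner]
        by_cases hij : i = j
        · subst hij
          have hp : (ownF artifacts [x, y] == some i) = true := by
            simp [ownF, howner]
          rw [hs, ih, hp, PySem.Dict.getD_insert_self]
          simp only [if_true]
          push_cast; ring
        · have hp : (ownF artifacts [x, y] == some j) = false := by
            simp [ownF, howner, hij]
          rw [hs, ih, hp, PySem.Dict.getD_insert, if_neg (fun h : j = i => hij h.symm)]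
          simp
    · rw [ih]; simp [hitStep, ownF]

-- count split at one distinguished element of a Nodup list
theorem countP_split {α : Type} [DecidableEq α] (L : List α) (p q : α → Bool) (j : α)
    (hnd : L.Nodup) (hj : j ∈ L) (hoff : ∀ i ∈ L, i ≠ j → p i = q i) :
    (L.countP p : Int) = (L.countP q : Int)
      + (if p j then (1 : Int) else 0) - (if q j then (1 : Int) else 0) := by
  induction L with
  | nil => simp at hj
  | cons a L ih =>
    rw [List.countP_cons, List.countP_cons]
    push_cast
    have hndL := (List.nodup_cons.1 hnd).2
    have hna := (List.nodup_cons.1 hnd).1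
    rcases List.mem_cons.1 hj with rfl | hjL
    · have hLeq : L.countP p = L.countP q :=
        List.countP_congr (fun i hi => by
          rw [hoff i (List.mem_cons_of_mem _ hi) (fun h => hna (by rwa [h] at hi))])
      rw [hLeq]
      split_ifs <;> omega
    · have hja : a ≠ j := fun h => hna (h ▸ hjL)
      have hpa : p a = q a := hoff a (List.mem_cons_self) hja
      rw [hpa, ih hndL hjL (fun i hi hne => hoff i (List.mem_cons_of_mem _ hi) hne)]
      split_ifs <;> omega

-- the main invariant of A's dig loop, against a count-and-compare characterisation
theorem dig_loop (artifacts : List (List Int)) (H4 : ∀ a ∈ artifacts, a.length = 4) :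
    ∀ (l : List (List Int)) (_ : ∀ d ∈ l, d.length = 2) (ans0 : Int)
      (cnt : PySem.Dict Int Int) (h : Int → Int)
      (_ : ∀ jn : Nat, jn < artifacts.length →
          cnt.getD (jn : Int) 0 = areaAt artifacts (jn : Int) - h (jn : Int)),
      (l.foldl (digStep (artifacts.foldl buildStep (0, PySem.Dict.empty, PySem.Dict.empty)).2.1)
          (ans0, cnt)).1
        = ans0 + ((PySem.List.pyRange 0 (artifacts.length : Int) 1).countP
            (fun i => decide (1 ≤ areaAt artifacts i ∧ h i < areaAt artifacts i
              ∧ areaAt artifacts i ≤ h i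
                  + (l.countP (fun d => ownFull artifacts d == some i) : Int))) : Int) := by
  intro l
  induction l with
  | nil =>
    intro _ ans0 cnt h _
    rw [List.foldl_nil]
    have : ((PySem.List.pyRange 0 (artifacts.length : Int) 1).countP
        (fun i => decide (1 ≤ areaAt artifacts i ∧ h i < areaAt artifacts i
          ∧ areaAt artifacts i ≤ h i + (List.countP (fun d => ownFull artifacts d == some i) [] : Int)))) = 0 := by
      apply List.countP_eq_zero.2
      intro i _
      simp only [decide_eq_true_eq]
      rintro ⟨h1, h2, h3⟩
      rw [List.countP_nil] at h3
      omega
    simp [this]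
  | cons d rest ih =>
    intro H2 ans0 cnt h Hc
    obtain ⟨x, y, rfl⟩ := len2_shape d (H2 d List.mem_cons_self)
    have H2r : ∀ d ∈ rest, d.length = 2 := fun d hd => H2 d (List.mem_cons_of_mem _ hd)
    rw [List.foldl_cons]
    have hcav := (build_spec artifacts H4).2.1 x y
    show (rest.foldl _ (digStep _ (ans0, cnt) [x, y])).1 = _
    cases howner : ownerAux artifacts.reverse ((artifacts.length : Int) - 1) x y with
    | none =>
      have hstep : digStep (artifacts.foldl buildStep (0, PySem.Dict.empty, PySem.Dict.empty)).2.1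
          (ans0, cnt) [x, y] = (ans0, cnt) := by
        simp only [digStep, hcav, howner]
      rw [hstep, ih H2r ans0 cnt h Hc]
      congr 2
      apply List.countP_congr
      intro i _
      have hpred : (ownFull artifacts [x, y] == some i) = false := by
        simp [ownFull, howner]
      simp [List.countP_cons, hpred]
    | some j =>
      obtain ⟨jn, rfl, hjn, harea⟩ := owner_some artifacts H4 x y j howner
      have hgetD : cnt.getD (jn : Int) 0 = areaAt artifacts (jn : Int) - h (jn : Int) := Hc jn hjn
      have hstep : digStep (artifacts.foldl buildStep (0, PySem.Dict.empty, PySem.Dict.empty)).2.1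
          (ans0, cnt) [x, y]
          = ((if areaAt artifacts (jn : Int) - h (jn : Int) - 1 = 0 then ans0 + 1 else ans0),
             cnt.insert (jn : Int) (areaAt artifacts (jn : Int) - h (jn : Int) - 1)) := by
        simp only [digStep, hcav, howner, hgetD, PySem.Dict.getD_insert_self]
        congr 1
        by_cases hz : areaAt artifacts (jn : Int) - h (jn : Int) - 1 = 0
        · simp [hz]
        · simp [hz]
      rw [hstep]
      set h' : Int → Int := fun i => if i = (jn : Int) then h i + 1 else h i with hh'
      have Hc' : ∀ kn : Nat, kn < artifacts.length →
          (cnt.insert (jn : Int) (areaAt artifacts (jn : Int) - h (jn : Int) - 1)).getD (kn : Int) 0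
            = areaAt artifacts (kn : Int) - h' (kn : Int) := by
        intro kn hkn
        rw [PySem.Dict.getD_insert]
        have hbeta : h' (kn : Int) = if (kn : Int) = (jn : Int) then h (kn : Int) + 1 else h (kn : Int) := by
          rw [hh']
        rw [hbeta]
        by_cases hk : (kn : Int) = (jn : Int)
        · rw [if_pos hk, if_pos hk, hk]; ring
        · rw [if_neg hk, if_neg hk, Hc kn hkn]
      rw [ih H2r _ _ h' Hc']
      have hmem : (jn : Int) ∈ PySem.List.pyRange 0 (artifacts.length : Int) 1 := by
        rw [PySem.List.mem_pyRange_one]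
        constructor
        · positivity
        · exact_mod_cast hjn
      have hnd := PySem.List.nodup_pyRange_one (a := 0) (b := (artifacts.length : Int))
      have hoff : ∀ i ∈ PySem.List.pyRange 0 (artifacts.length : Int) 1, i ≠ (jn : Int) →
          (fun i => decide (1 ≤ areaAt artifacts i ∧ h i < areaAt artifacts i
            ∧ areaAt artifacts i ≤ h i
              + (List.countP (fun d => ownFull artifacts d == some i) ([x, y] :: rest) : Int))) i
          = (fun i => decide (1 ≤ areaAt artifacts i ∧ h' i < areaAt artifacts i
            ∧ areaAt artifacts i ≤ h' i
              + (List.countP (fun d => ownFull artifacts d == some i) rest : Int))) i := by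
        intro i _ hne
        have hpred : (ownFull artifacts [x, y] == some i) = false := by
          simp [ownFull, howner]
          omega
        have hcnt : List.countP (fun d => ownFull artifacts d == some i) ([x, y] :: rest)
            = List.countP (fun d => ownFull artifacts d == some i) rest := by
          rw [List.countP_cons, hpred]; rfl
        have hh : h' i = h i := by rw [hh']; simp [hne]
        simp only [hcnt, hh]
      rw [countP_split _ _ _ ((jn : Int)) hnd hmem hoff]
      have hcntj : (List.countP (fun d => ownFull artifacts d == some ((jn : Int))) ([x, y] :: rest) : Int)
          = (List.countP (fun d => ownFull artifacts d == some ((jn : Int))) rest : Int) + 1 := by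
        rw [List.countP_cons]
        have : (ownFull artifacts [x, y] == some ((jn : Int))) = true := by
          simp [ownFull, howner]
        rw [this]
        simp only [if_true]
        push_cast; ring
      have hhj : h' (jn : Int) = h (jn : Int) + 1 := by rw [hh']; simp
      set A := areaAt artifacts (jn : Int) with hA
      set cR := (List.countP (fun d => ownFull artifacts d == some ((jn : Int))) rest : Int) with hcR
      have hcR0 : 0 ≤ cR := by rw [hcR]; positivity
      by_cases hz : A - h (jn : Int) - 1 = 0
      · rw [if_pos hz]
        have hp : decide (1 ≤ A ∧ h (jn : Int) < A ∧ A ≤ h (jn : Int)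
            + (List.countP (fun d => ownFull artifacts d == some ((jn : Int))) ([x, y] :: rest) : Int)) = true := by
          rw [hcntj]
          simp only [decide_eq_true_iff]
          omega
        have hq : decide (1 ≤ A ∧ h' (jn : Int) < A ∧ A ≤ h' (jn : Int) + cR) = false := by
          rw [hhj]
          simp only [decide_eq_false_iff_not]
          omega
        rw [hp, hq]
        norm_num
        omega
      · rw [if_neg hz]
        have hpq : decide (1 ≤ A ∧ h (jn : Int) < A ∧ A ≤ h (jn : Int)
            + (List.countP (fun d => ownFull artifacts d == some ((jn : Int))) ([x, y] :: rest) : Int))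
            = decide (1 ≤ A ∧ h' (jn : Int) < A ∧ A ≤ h' (jn : Int) + cR) := by
          rw [hcntj, hhj]
          apply decide_eq_decide.2
          constructor <;> (intro hc; refine ⟨hc.1, by omega, by omega⟩)
        rw [hpq]
        ring

-- ===== VERDICT (by name: the statement is the Claim_ definition above) =====
theorem digArtifacts_spec : Claim_equal_digArtifacts := by
  intro n artifacts dig _ hpre
  obtain ⟨Hwf, H2, Hd⟩ := hpre
  have H4 : ∀ a ∈ artifacts, a.length = 4 := fun a ha => wf_len4 a (Hwf a ha)
  unfold Spec_digArtifacts digArtifacts digArtifacts_alt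
  simp only []
  have Hc : ∀ jn : Nat, jn < artifacts.length →
      (artifacts.foldl buildStep (0, PySem.Dict.empty, PySem.Dict.empty)).2.2.getD (jn : Int) 0
        = areaAt artifacts (jn : Int) - (fun _ : Int => (0 : Int)) (jn : Int) := by
    intro jn hjn
    rw [(build_spec artifacts H4).2.2 jn hjn]
    ring
  rw [dig_loop artifacts H4 dig H2 0 _ (fun _ => 0) Hc]
  -- B side: rewrite the answer loop into a countP over the same range
  have hB : ∀ (ans : Int) (i : Int), i ∈ PySem.List.pyRange 0 (artifacts.length : Int) 1 →
      ansStep artifacts (dig.foldl (hitStep artifacts) PySem.Dict.empty) ans i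
        = if (decide (1 ≤ areaAt artifacts i ∧ 0 < areaAt artifacts i
            ∧ areaAt artifacts i ≤ 0 + (dig.countP (fun d => ownFull artifacts d == some i) : Int)))
          then ans + 1 else ans := by
    intro ans i hi
    rw [PySem.List.mem_pyRange_one] at hi
    have hi0 : 0 ≤ i := hi.1
    have hilen : i.toNat < artifacts.length := by omega
    have hget : PySem.List.pyGet? artifacts i = some artifacts[i.toNat] := by
      have hcast : i = ((i.toNat : Nat) : Int) := by omega
      conv_lhs => rw [hcast]
      rw [PySem.List.pyGet?_natCast, List.getElem?_eq_getElem hilen]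
    obtain ⟨r1, c1, r2, c2, hart, hA1⟩ := wf_shape artifacts[i.toNat] (Hwf _ (List.getElem_mem _))
    have hAi : areaAt artifacts i = (r2 - r1 + 1) * (c2 - c1 + 1) := by
      unfold areaAt
      rw [List.getElem?_eq_getElem hilen, hart]
      simp [areaOf]
    have hhits : (dig.foldl (hitStep artifacts) PySem.Dict.empty).getD i 0
        = (dig.countP (fun d => ownFull artifacts d == some i) : Int) := by
      rw [hits_getD]
      have : dig.countP (fun d => ownF artifacts d == some i)
          = dig.countP (fun d => ownFull artifacts d == some i) :=
        List.countP_congr (fun d _ => by rw [own_eq artifacts Hwf Hd d])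
      rw [this]; simp
    simp only [ansStep, hget, hart, hhits]
    have hiff : ((dig.countP (fun d => ownFull artifacts d == some i) : Int) ≥ (r2 - r1 + 1) * (c2 - c1 + 1))
        ↔ (decide (1 ≤ areaAt artifacts i ∧ 0 < areaAt artifacts i
            ∧ areaAt artifacts i ≤ 0 + (dig.countP (fun d => ownFull artifacts d == some i) : Int)) = true) := by
      rw [decide_eq_true_eq, hAi]
      omega
    rw [if_congr hiff rfl rfl]
  have hfold : (PySem.List.pyRange 0 (artifacts.length : Int) 1).foldl
      (ansStep artifacts (dig.foldl (hitStep artifacts) PySem.Dict.empty)) 0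
      = (PySem.List.pyRange 0 (artifacts.length : Int) 1).foldl
        (fun ans i => if (decide (1 ≤ areaAt artifacts i ∧ 0 < areaAt artifacts i
            ∧ areaAt artifacts i ≤ 0 + (dig.countP (fun d => ownFull artifacts d == some i) : Int)))
          then ans + 1 else ans) 0 := PySem.List.foldl_congr_mem _ _ _ _ hB
  rw [hfold, PySem.List.foldl_if_add_one]
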